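-- pv_equiv track=rewrite | github.com/heohak/python | KT/kt4/exam.py | sum_elements_around_last_three
-- ===== SOURCE A (Python) =====
-- def sum_elements_around_last_three(nums: list) -> int:
--     """
--     Find sum of elements before and after last 3 in the list.
--
--     If there is no 3 in the list or list is too short
--     or there is no element before or after last 3 return 0.
--
--     Note if 3 is last element in the list you must return
--     sum of elements before and after 3 which is before last.
--
--
--     sum_elements_around_last_three([1, 3, 7]) -> 8
--     sum_elements_around_last_three([1, 2, 3, 4, 6, 4, 3, 4, 5, 3, 4, 5, 6]) -> 9
--     sum_elements_around_last_three([1, 2, 3, 4, 6, 4, 3, 4, 5, 3, 3, 2, 3]) -> 5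
--     sum_elements_around_last_three([1, 2, 3]) -> 0
--
--     :param nums: given list of ints
--     :return: sum of elements before and after last 3
--     """
--     index = None
--     for i in range(len(nums) - 2, -1, -1):
--         if nums[i] == 3:
--             index = i
--             break
--     if index is not None:
--         if index > 0 and index < len(nums) - 1:
--             return nums[index - 1] + nums[index + 1]
--     return 0
-- ===== SOURCE B (Python) =====
-- def sum_elements_around_last_three(nums: list) -> int:
--     last_idx = None
--     for i in range(0, len(nums) - 1):
--         if nums[i] == 3:
--             last_idx = i
--     if last_idx is not None and 0 < last_idx < len(nums) - 1:
--         return nums[last_idx - 1] + nums[last_idx + 1]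
--     return 0
-- ===== Notes on version B (the rewrite author's own statement) =====
-- stated objective: alternative
-- what changed: Replaces A's backward early-break scan (from len-2 down to 0, breaking at the first 3) with a single forward pass that overwrites a running last-match index, then reads the neighbors once after the loop.
import Mathlib
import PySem

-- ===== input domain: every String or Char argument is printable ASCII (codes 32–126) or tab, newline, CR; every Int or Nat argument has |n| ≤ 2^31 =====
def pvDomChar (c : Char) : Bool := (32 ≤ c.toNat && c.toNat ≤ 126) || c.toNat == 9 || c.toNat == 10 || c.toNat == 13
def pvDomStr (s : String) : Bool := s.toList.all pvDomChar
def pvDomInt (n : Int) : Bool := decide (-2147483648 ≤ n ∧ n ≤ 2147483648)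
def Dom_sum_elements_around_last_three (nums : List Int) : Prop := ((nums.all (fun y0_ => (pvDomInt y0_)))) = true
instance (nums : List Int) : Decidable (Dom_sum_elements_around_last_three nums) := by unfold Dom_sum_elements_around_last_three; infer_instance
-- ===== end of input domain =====

-- B: forward scan remembering the last matching index, instead of A's backward early-break scan.
-- ===== PORT A =====
-- loop 'for i in range(len(nums)-2, -1, -1): if nums[i]==3: index=i; break' as recursion over the range list
def pvLoopA (nums : List Int) : List Int → Option Int
  | [] => none
  | i :: rest => if PySem.List.pyGet? nums i = some 3 then some i else pvLoopA nums rest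

def sum_elements_around_last_three (nums : List Int) : Int :=
  let n : Int := nums.length
  let index := pvLoopA nums (PySem.List.pyRange (n - 2) (-1) (-1))
  match index with
  | some i =>
      if i > 0 ∧ i < n - 1 then
        -- i-1 and i+1 are in range here, so pyGetD with default 0 is exact
        PySem.List.pyGetD nums (i - 1) 0 + PySem.List.pyGetD nums (i + 1) 0
      else 0
  | none => 0

-- ===== PORT B =====
def sum_elements_around_last_three_alt (nums : List Int) : Int :=
  let n : Int := nums.length
  let last_idx := (PySem.List.pyRange 0 (n - 1) 1).foldl
      (fun acc i => if PySem.List.pyGet? nums i = some 3 then some i else acc) (none : Option Int)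
  match last_idx with
  | some i =>
      if 0 < i ∧ i < n - 1 then
        PySem.List.pyGetD nums (i - 1) 0 + PySem.List.pyGetD nums (i + 1) 0
      else 0
  | none => 0

-- ===== PRECONDITION & SPEC =====
def Spec_sum_elements_around_last_three (nums : List Int) (out : Int) : Prop := out = sum_elements_around_last_three_alt nums
instance (nums : List Int) (out : Int) : Decidable (Spec_sum_elements_around_last_three nums out) := by unfold Spec_sum_elements_around_last_three; infer_instance

-- ===== CLAIM (what is proved, stated in full; the proofs are below) =====
def Claim_equal_sum_elements_around_last_three : Prop := ∀ (nums : List Int), Dom_sum_elements_around_last_three nums → Spec_sum_elements_around_last_three nums (sum_elements_around_last_three nums)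

-- ===== LEMMAS AND PROOFS =====

-- ===== VERDICT (by name: the statement is the Claim_ definition above) =====
-- last match of a forward fold over l.reverse = first match of a head-first scan of l
theorem pvFold_reverse_eq_loop (nums : List Int) (l : List Int) :
    l.reverse.foldl
      (fun acc i => if PySem.List.pyGet? nums i = some 3 then some i else acc) (none : Option Int)
      = pvLoopA nums l := by
  induction l with
  | nil => rfl
  | cons i rest ih =>
      simp [pvLoopA, List.foldl_append]
      split_ifs with h
      · rfl
      · simpa [List.foldl_reverse] using ih

theorem pvLoop_of_reverse (nums : List Int) (l : List Int) :
    pvLoopA nums l.reverse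
      = l.foldl (fun acc i => if PySem.List.pyGet? nums i = some 3 then some i else acc)
          (none : Option Int) := by
  have h := pvFold_reverse_eq_loop nums l.reverse
  simpa using h.symm

theorem pvPorts_eq (nums : List Int) :
    sum_elements_around_last_three nums = sum_elements_around_last_three_alt nums := by
  unfold sum_elements_around_last_three sum_elements_around_last_three_alt
  have hr : PySem.List.pyRange ((nums.length : Int) - 2) (-1) (-1)
      = (PySem.List.pyRange 0 ((nums.length : Int) - 1) 1).reverse := by
    rw [PySem.List.pyRange_neg_one_eq_reverse]; ring_nf
  simp only [hr, pvLoop_of_reverse]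

theorem sum_elements_around_last_three_spec : Claim_equal_sum_elements_around_last_three := by
  intro nums _
  unfold Spec_sum_elements_around_last_three
  exact pvPorts_eq nums
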